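-- pv_equiv track=rewrite | github.com/wuzhiding1989/newqkex | BU/futures/testcase/case/Excel_cont.py | str_add_one
-- ===== SOURCE A (Python) =====
-- def str_add_one(s):
--     # 将字符串最后一位字符转成 ASCII 码
--     ascii_code = ord(s[-1])
--     # 判断如果是 '9'，则进位到 'A'
--     if ascii_code == 57:
--         return s[:-1] + 'A'
--     # 判断如果是 'Z'，则进位到 'AA'
--     elif ascii_code == 90:
--         return str_add_one(s[:-1]) + 'A'
--     # 其他情况直接将最后一位字符+1即可
--     else:
--         return s[:-1] + chr(ascii_code + 1)
-- ===== SOURCE B (Python) =====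
-- def str_add_one(s):
--     # Iterative carry loop over a char list instead of carry-recursion on slices.
--     lst = list(s)
--     i = len(lst) - 1
--     while i >= 0:
--         code = ord(lst[i])
--         if code == 57:          # '9' rolls over to 'A' (no carry)
--             lst[i] = 'A'
--             return ''.join(lst)
--         elif code == 90:        # 'Z' rolls over to 'A' and carries left
--             lst[i] = 'A'
--             i -= 1
--         else:
--             lst[i] = chr(code + 1)
--             return ''.join(lst)
--     raise IndexError('string index out of range')
-- ===== Notes on version B (the rewrite author's own statement) =====
-- stated objective: alternative
-- what changed: Replaced the carry-recursion on string slices (s[:-1] copied at every carry) with a single iterative right-to-left carry loop over a char list that mutates in place and joins once.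
-- outside the precondition, e.g. on str_add_one('Z'): A raises IndexError, B raises IndexError; on str_add_one(''): A raises IndexError, B raises IndexError
import Mathlib
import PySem

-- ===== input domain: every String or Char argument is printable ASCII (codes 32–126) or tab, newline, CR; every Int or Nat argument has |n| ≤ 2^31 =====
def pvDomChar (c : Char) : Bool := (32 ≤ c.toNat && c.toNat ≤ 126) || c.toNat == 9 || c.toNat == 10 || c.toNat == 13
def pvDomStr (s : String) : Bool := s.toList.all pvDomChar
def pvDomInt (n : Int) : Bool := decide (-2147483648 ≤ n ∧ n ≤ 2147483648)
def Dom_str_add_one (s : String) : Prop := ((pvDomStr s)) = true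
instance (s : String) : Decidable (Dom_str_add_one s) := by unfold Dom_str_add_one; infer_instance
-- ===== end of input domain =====

-- B replaces A's carry-recursion on slices by one iterative right-to-left carry loop over a char list.

-- ===== PORT A =====
-- Recursive core over the char list; s[-1] is PySem.List.pyGet? l (-1) (none = IndexError,
-- excluded by Pre_, junk [] returned), s[:-1] is l.dropLast (exact: PySem.List.slice_to_neg_one).
def strAddOneCore (l : List Char) : List Char :=
  match h : PySem.List.pyGet? l (-1) with
  | none => []
  | some c =>
    if c.toNat = 57 then l.dropLast ++ ['A']
    else if c.toNat = 90 then strAddOneCore l.dropLast ++ ['A']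
    else l.dropLast ++ [Char.ofNat (c.toNat + 1)]
termination_by l.length
decreasing_by
  have hne : l ≠ [] := by
    intro hl; subst hl; simp [PySem.List.pyGet?] at h
  have : 0 < l.length := List.length_pos_iff.mpr hne
  rw [List.length_dropLast]; omega

def str_add_one (s : String) : String := String.ofList (strAddOneCore s.toList)

-- ===== PORT B =====
-- The while loop: index i walks leftward; 'Z' carries, anything else stops.
-- Python raises IndexError when i falls below 0 (all-'Z' input): ported as none (excluded by Pre_).
def bLoop (l : List Char) (i : Nat) : Option (List Char) :=
  let c := l.getD i ' '
  if c.toNat = 57 then some (l.set i 'A')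
  else if c.toNat = 90 then
    if i = 0 then none
    else bLoop (l.set i 'A') (i - 1)
  else some (l.set i (Char.ofNat (c.toNat + 1)))
termination_by i

def str_add_one_alt (s : String) : String :=
  let l := s.toList
  if l.length = 0 then ""   -- loop never runs, Python raises IndexError (outside Pre_)
  else
    match bLoop l (l.length - 1) with
    | some r => String.ofList r
    | none => ""            -- IndexError (outside Pre_)

-- ===== PRECONDITION & SPEC =====
-- A raises IndexError exactly on the empty string and on all-'Z' strings (the recursion
-- bottoms out at ord(""[-1])); Pre_ excludes exactly those, B raises IndexError there too.
def Pre_str_add_one (s : String) : Prop := (s.toList.all (fun c => c == 'Z')) = false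
instance (s : String) : Decidable (Pre_str_add_one s) := by unfold Pre_str_add_one; infer_instance
def pvWitness_str_add_one : String := "AZ"

def Spec_str_add_one (s : String) (out : String) : Prop := out = str_add_one_alt s
instance (s : String) (out : String) : Decidable (Spec_str_add_one s out) := by unfold Spec_str_add_one; infer_instance

-- ===== CLAIM (what is proved, stated in full; the proofs are below) =====
def Claim_equal_str_add_one : Prop := ∀ (s : String), Dom_str_add_one s → Pre_str_add_one s → Spec_str_add_one s (str_add_one s)

-- ===== LEMMAS AND PROOFS =====

theorem char_eq_Z_of_toNat (c : Char) (h : c.toNat = 90) : c = 'Z' :=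
  Char.ext (UInt32.toNat_inj.mp (h.trans (by decide)))

theorem core_append (l : List Char) (c : Char) : strAddOneCore (l ++ [c]) =
    (if c.toNat = 57 then l ++ ['A']
     else if c.toNat = 90 then strAddOneCore l ++ ['A']
     else l ++ [Char.ofNat (c.toNat + 1)]) := by
  rw [strAddOneCore.eq_def]
  split
  · rename_i heq
    rw [PySem.List.pyGet?_neg_one_append_singleton] at heq
    cases heq
  · rename_i c' heq
    rw [PySem.List.pyGet?_neg_one_append_singleton] at heq
    cases heq
    simp

theorem bLoop_append (t : List Char) : ∀ (i : Nat) (l : List Char), i < l.length →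
    bLoop (l ++ t) i = (bLoop l i).map (· ++ t) := by
  intro i
  induction i with
  | zero =>
    intro l hl
    conv_lhs => rw [bLoop]
    conv_rhs => rw [bLoop]
    simp only [List.getD_append l t ' ' 0 hl]
    split_ifs <;> simp [List.set_append_left 0 _ hl]
  | succ n ih =>
    intro l hl
    conv_lhs => rw [bLoop]
    conv_rhs => rw [bLoop]
    simp only [List.getD_append l t ' ' (n+1) hl]
    split_ifs
    · simp [List.set_append_left (n+1) _ hl]
    · simp
    · rw [List.set_append_left (n+1) 'A' hl]
      simpa using ih (l.set (n+1) 'A') (by simp; omega)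
    · simp [List.set_append_left (n+1) _ hl]

theorem main_lemma : ∀ (l : List Char), (l.all (fun c => c == 'Z')) = false →
    bLoop l (l.length - 1) = some (strAddOneCore l) := by
  intro l
  induction l using List.reverseRecOn with
  | nil => intro h; simp at h
  | append_singleton l c ih =>
    intro h
    rw [core_append]
    have hlen : (l ++ [c]).length - 1 = l.length := by simp
    have hgetD : (l ++ [c]).getD l.length ' ' = c := by simp
    have hset : ∀ x : Char, (l ++ [c]).set l.length x = l ++ [x] := by intro x; simp
    rw [hlen, bLoop]
    simp only [hgetD]
    have hZ : c.toNat = 90 → l.all (fun c => c == 'Z') = false := by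
      intro h90
      have hc : c = 'Z' := char_eq_Z_of_toNat c h90
      rcases List.all_eq_false.mp h with ⟨x, hx, hxz⟩
      rcases List.mem_append.mp hx with hxl | hxc
      · exact List.all_eq_false.mpr ⟨x, hxl, hxz⟩
      · simp at hxc; subst hxc hc; simp at hxz
    split_ifs with h57 h90 h0
    · simp [hset]
    · -- carry with l.length = 0: impossible, the non-'Z' char lies in l
      have hall := hZ h90
      have : l ≠ [] := by intro hl; subst hl; simp at hall
      exact absurd (List.length_eq_zero_iff.mp h0) this
    · -- carry case: recurse on l via the IH and the frame lemma
      have hall := hZ h90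
      have hpos : 0 < l.length := by
        cases Nat.eq_zero_or_pos l.length with
        | inl hz => exact absurd hz h0
        | inr hp => exact hp
      rw [hset 'A']
      rw [bLoop_append ['A'] (l.length - 1) l (by omega)]
      rw [ih hall]
      rfl
    · simp [hset]

theorem core_eq (s : String) (h : Pre_str_add_one s) : str_add_one s = str_add_one_alt s := by
  unfold Pre_str_add_one at h
  have hne : s.toList ≠ [] := by intro hl; rw [hl] at h; simp at h
  unfold str_add_one str_add_one_alt
  rw [if_neg (by simpa [List.length_eq_zero_iff] using hne)]
  rw [main_lemma s.toList h]

-- ===== VERDICT (by name: the statement is the Claim_ definition above) =====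
theorem str_add_one_spec : Claim_equal_str_add_one := by
  intro s _ hpre
  unfold Spec_str_add_one
  exact core_eq s hpre
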